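-- pv_equiv track=rewrite | github.com/arnejad/Gaze-Shift-Compare | modules/methods/IVT.py | enforce_min_duration
-- ===== SOURCE A (Python) =====
-- def enforce_min_duration(labels, min_duration_ms, sampling_rate):
--     labels = labels.copy()
--     min_samples = int(round((min_duration_ms / 1000.0) * sampling_rate))
--
--     i = 0
--     while i < len(labels):
--         if labels[i] == 0:  # start of potential fixation
--             start = i
--             while i < len(labels) and labels[i] == 0:
--                 i += 1
--             duration = i - start
--             if duration < min_samples:
--                 labels[start:i] = [1] * duration  # reclassify as saccade
--         else:
--             i += 1
--     return labels
-- ===== SOURCE B (Python) =====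
-- def enforce_min_duration(labels, min_duration_ms, sampling_rate):
--     min_samples = int(round((min_duration_ms / 1000.0) * sampling_rate))
--     # pass 1: run-length encode the labels into (value, length) pairs
--     runs = []
--     cur_val = None
--     cur_len = 0
--     for v in labels:
--         if cur_len > 0 and v == cur_val:
--             cur_len += 1
--         else:
--             if cur_len > 0:
--                 runs.append((cur_val, cur_len))
--             cur_val, cur_len = v, 1
--     if cur_len > 0:
--         runs.append((cur_val, cur_len))
--     # pass 2: rebuild the label list, turning short zero-runs into saccades
--     out = []
--     for v, l in runs:
--         out.extend([1] * l if (v == 0 and l < min_samples) else [v] * l)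
--     return out
-- ===== Notes on version B (the rewrite author's own statement) =====
-- stated objective: alternative
-- what changed: Replaces the index-based while-loop that rewrites zero-segments of a copied list in place with a two-pass decomposition: first run-length encode the labels into (value,length) runs, then rebuild the output by expanding each run (short zero-runs become 1s).
import Mathlib
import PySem

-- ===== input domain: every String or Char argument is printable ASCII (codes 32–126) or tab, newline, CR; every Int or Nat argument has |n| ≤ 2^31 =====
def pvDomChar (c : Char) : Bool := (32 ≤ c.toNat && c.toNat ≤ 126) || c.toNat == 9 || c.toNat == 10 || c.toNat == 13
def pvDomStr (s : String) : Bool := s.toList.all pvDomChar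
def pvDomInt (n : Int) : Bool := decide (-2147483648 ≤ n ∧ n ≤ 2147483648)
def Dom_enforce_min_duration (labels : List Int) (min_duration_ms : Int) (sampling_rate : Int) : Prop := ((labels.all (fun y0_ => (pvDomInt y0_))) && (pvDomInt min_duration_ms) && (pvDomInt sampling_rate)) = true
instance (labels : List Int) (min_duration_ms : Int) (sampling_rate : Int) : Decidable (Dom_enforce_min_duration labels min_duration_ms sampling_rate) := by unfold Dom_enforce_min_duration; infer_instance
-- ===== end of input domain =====

-- B replaces A's index-based in-place rewriting of zero-segments by a two-pass
-- run-length-encode / rebuild decomposition (same O(n) cost, different structure);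
-- A copies its argument, so neither version mutates the input.

-- ===== PORT A =====
-- `int(round((min_duration_ms / 1000.0) * sampling_rate))` is ported by hand as an
-- EXACT integer emulation of the IEEE-754 double computation (correctly rounded
-- division by 1000.0, correctly rounded product, round-half-to-even to int);
-- this helper is shared by both ports because both Pythons contain this same line.

-- round num/den to the nearest integer, ties to even (den > 0)
def pyRHE (num den : Int) : Int :=
  let f := PySem.Int.floordiv num den
  let r := num - f * den
  if 2 * r < den then f else if den < 2 * r then f + 1 else if f % 2 = 0 then f else f + 1

-- round the positive rational num/den to a 53-bit significand: (m, e) with value m·2^e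
def pyFl53 (num den : Nat) : Int × Int :=
  let k : Int := (Nat.log2 (num * 2 ^ 70 / den) : Int) - 70   -- ⌊log₂(num/den)⌋ (value ≥ 2^-70)
  let e : Int := k - 52
  let m : Int :=
    if 0 ≤ e then pyRHE (num : Int) ((den : Int) * 2 ^ e.toNat)
    else pyRHE ((num : Int) * 2 ^ (-e).toNat) (den : Int)
  (m, e)

-- exact value of Python's  int(round((m / 1000.0) * s))  for |m|,|s| ≤ 2^31
def pyMinSamples (m s : Int) : Int :=
  if m = 0 ∨ s = 0 then 0
  else
    let sgn : Int := (if 0 < m then 1 else -1) * (if 0 < s then 1 else -1)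
    let p1 := pyFl53 m.natAbs 1000
    let num2 := p1.1 * (s.natAbs : Int)
    let p2 :=
      if 0 ≤ p1.2 then pyFl53 (num2.toNat * 2 ^ p1.2.toNat) 1
      else pyFl53 num2.toNat (2 ^ (-p1.2).toNat)
    if 0 ≤ p2.2 then sgn * p2.1 * 2 ^ p2.2.toNat else pyRHE (sgn * p2.1) (2 ^ (-p2.2).toNat)

-- inner `while i < len(labels) and labels[i] == 0: i += 1`
def zscan (labels : List Int) (i : Nat) : Nat :=
  if h : i < labels.length then
    if labels[i] = 0 then zscan labels (i + 1) else i
  else i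
termination_by labels.length - i
decreasing_by omega

theorem zscan_ge (labels : List Int) (i : Nat) : i ≤ zscan labels i := by
  fun_induction zscan labels i with
  | case1 i h h0 ih => omega
  | case2 i h h0 => omega
  | case3 i h => omega

theorem zscan_le (labels : List Int) (i : Nat) (hi : i ≤ labels.length) :
    zscan labels i ≤ labels.length := by
  fun_induction zscan labels i with
  | case1 i h h0 ih => exact ih (by omega)
  | case2 i h h0 => omega
  | case3 i h => omega

theorem zscan_gt (labels : List Int) (i : Nat) (h : i < labels.length)
    (h0 : labels[i] = 0) : i < zscan labels i := by
  unfold zscan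
  rw [dif_pos h, if_pos h0]
  have := zscan_ge labels (i + 1)
  omega

-- outer while loop of A; slice assignment labels[start:i] = [1]*duration becomes
-- take start ++ replicate duration 1 ++ drop i (same-length splice)
def aLoop (labels : List Int) (ms : Int) (i : Nat) : List Int :=
  if h : i < labels.length then
    if h0 : labels[i] = 0 then
      let j := zscan labels i
      let d := j - i
      let labels' :=
        if (d : Int) < ms then labels.take i ++ List.replicate d 1 ++ labels.drop j
        else labels
      aLoop labels' ms j
    else aLoop labels ms (i + 1)
  else labels
termination_by labels.length - i
decreasing_by
  · have hj := zscan_gt labels i h h0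
    have hle := zscan_le labels i (le_of_lt h)
    split <;> simp <;> omega
  · omega

def enforce_min_duration (labels : List Int) (min_duration_ms : Int) (sampling_rate : Int) : List Int :=
  aLoop labels (pyMinSamples min_duration_ms sampling_rate) 0

-- ===== PORT B =====
-- pass-1 loop body: extend the current run or flush it and start a new one
def bStep (st : List (Int × Nat) × Option Int × Nat) (v : Int) :
    List (Int × Nat) × Option Int × Nat :=
  match st with
  | (runs, curVal, curLen) =>
    if 0 < curLen ∧ curVal = some v then (runs, curVal, curLen + 1)
    else ((if 0 < curLen then runs ++ [(curVal.getD 0, curLen)] else runs), some v, 1)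

-- final flush after the loop
def bFlush (st : List (Int × Nat) × Option Int × Nat) : List (Int × Nat) :=
  match st with
  | (runs, curVal, curLen) => if 0 < curLen then runs ++ [(curVal.getD 0, curLen)] else runs

-- pass-2 expansion of one run
def bSeg (ms : Int) (vc : Int × Nat) : List Int :=
  if vc.1 = 0 ∧ (vc.2 : Int) < ms then List.replicate vc.2 1 else List.replicate vc.2 vc.1

def enforce_min_duration_alt (labels : List Int) (min_duration_ms : Int) (sampling_rate : Int) : List Int :=
  let ms := pyMinSamples min_duration_ms sampling_rate
  let runs := bFlush (labels.foldl bStep ([], none, 0))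
  runs.foldl (fun out vc => out ++ bSeg ms vc) []

-- ===== PRECONDITION & SPEC =====
def Spec_enforce_min_duration (labels : List Int) (min_duration_ms : Int) (sampling_rate : Int) (out : List Int) : Prop := out = enforce_min_duration_alt labels min_duration_ms sampling_rate
instance (labels : List Int) (min_duration_ms : Int) (sampling_rate : Int) (out : List Int) : Decidable (Spec_enforce_min_duration labels min_duration_ms sampling_rate out) := by unfold Spec_enforce_min_duration; infer_instance

-- ===== CLAIM (what is proved, stated in full; the proofs are below) =====
def Claim_equal_enforce_min_duration : Prop := ∀ (labels : List Int) (min_duration_ms : Int) (sampling_rate : Int), Dom_enforce_min_duration labels min_duration_ms sampling_rate → Spec_enforce_min_duration labels min_duration_ms sampling_rate (enforce_min_duration labels min_duration_ms sampling_rate)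

-- ===== LEMMAS AND PROOFS =====

-- merge a run (v, c) onto the front of a run list
def rmerge (v : Int) (c : Nat) : List (Int × Nat) → List (Int × Nat)
  | [] => [(v, c)]
  | (w, d) :: rest => if w = v then (v, c + d) :: rest else (v, c) :: (w, d) :: rest

-- reference run-length encoding
def rleSpec (l : List Int) : List (Int × Nat) := l.foldr (fun x rs => rmerge x 1 rs) []

-- reference recursion capturing what A does to a suffix
def procA (ms : Int) : List Int → List Int
  | [] => []
  | x :: xs =>
    if x = 0 then
      (if ((xs.takeWhile (· = (0 : Int))).length + 1 : Int) < ms then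
        List.replicate ((xs.takeWhile (· = (0 : Int))).length + 1) 1
       else x :: xs.takeWhile (· = (0 : Int))) ++ procA ms (xs.dropWhile (· = (0 : Int)))
    else x :: procA ms xs
termination_by l => l.length
decreasing_by
  · have := List.length_dropWhile_le (fun y => decide (y = (0 : Int))) xs
    simp
    omega
  · simp

theorem rmerge_merge (v : Int) (c : Nat) (rs : List (Int × Nat)) :
    rmerge v c (rmerge v 1 rs) = rmerge v (c + 1) rs := by
  match rs with
  | [] => simp [rmerge]
  | (w, d) :: tl =>
    by_cases h : w = v <;> simp [rmerge, h] <;> omega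

theorem rmerge_ne (v a : Int) (c : Nat) (h : v ≠ a) (rs : List (Int × Nat)) :
    rmerge v c (rmerge a 1 rs) = (v, c) :: rmerge a 1 rs := by
  match rs with
  | [] => simp [rmerge, Ne.symm h]
  | (w, d) :: tl =>
    by_cases hw : w = a <;> simp [rmerge, hw, Ne.symm h]

theorem foldB (l : List Int) : ∀ (runs : List (Int × Nat)) (v : Int) (c : Nat), 0 < c →
    bFlush (l.foldl bStep (runs, some v, c)) = runs ++ rmerge v c (rleSpec l) := by
  induction l with
  | nil => intro runs v c hc; simp [bFlush, rleSpec, rmerge, hc]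
  | cons a t ih =>
    intro runs v c hc
    by_cases hv : v = a
    · subst hv
      simp only [List.foldl_cons, bStep]
      rw [if_pos (show 0 < c ∧ True from ⟨hc, trivial⟩)]
      rw [ih runs v (c + 1) (by omega)]
      simp only [rleSpec, List.foldr_cons]
      rw [rmerge_merge]
    · have : ¬ (0 < c ∧ some v = some a) := by simp [hv]
      simp only [List.foldl_cons, bStep]
      rw [if_neg this, if_pos hc]
      simp only [Option.getD_some]
      rw [ih (runs ++ [(v, c)]) a 1 one_pos]
      simp only [rleSpec, List.foldr_cons]
      rw [rmerge_ne v a c hv]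
      simp

theorem rle_full (l : List Int) :
    bFlush (l.foldl bStep ([], none, 0)) = rleSpec l := by
  match l with
  | [] => simp [bFlush, rleSpec]
  | x :: xs =>
    have h1 : bStep ([], none, 0) x = ([], some x, 1) := by simp [bStep]
    rw [List.foldl_cons, h1, foldB xs [] x 1 one_pos]
    simp [rleSpec]

theorem foldl_append_seg (ms : Int) (rs : List (Int × Nat)) : ∀ acc : List Int,
    rs.foldl (fun out vc => out ++ bSeg ms vc) acc = acc ++ rs.flatMap (bSeg ms) := by
  induction rs with
  | nil => intro acc; simp
  | cons r t ih => intro acc; simp [List.foldl_cons, ih]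

theorem rleSpec_cons (xs : List Int) : ∀ x : Int,
    rleSpec (x :: xs) =
      (x, (xs.takeWhile (· = x)).length + 1) :: rleSpec (xs.dropWhile (· = x)) := by
  induction xs with
  | nil => intro x; simp [rleSpec, rmerge]
  | cons y t ih =>
    intro x
    by_cases h : y = x
    · subst h
      show rmerge y 1 (rleSpec (y :: t)) = _
      rw [ih y]
      simp [rmerge, List.takeWhile, List.dropWhile]
      omega
    · show rmerge x 1 (rleSpec (y :: t)) = _
      rw [ih y]
      have hne : ¬ (y = x) := h
      simp [rmerge, hne, List.takeWhile, List.dropWhile, ih y]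

theorem procA_nonzero_prefix (ms : Int) (t r : List Int) (ht : ∀ y ∈ t, y ≠ 0) :
    procA ms (t ++ r) = t ++ procA ms r := by
  induction t with
  | nil => simp
  | cons y t' ih =>
    have hy : y ≠ 0 := ht y (by simp)
    rw [List.cons_append, procA, if_neg hy, ih (fun z hz => ht z (by simp [hz]))]
    rfl

theorem flatMap_rle (ms : Int) : ∀ (n : Nat) (l : List Int), l.length ≤ n →
    (rleSpec l).flatMap (bSeg ms) = procA ms l := by
  intro n
  induction n with
  | zero =>
    intro l h
    have : l = [] := by cases l <;> simp_all
    simp [this, rleSpec, procA]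
  | succ n ih =>
    intro l h
    match l with
    | [] => simp [rleSpec, procA]
    | x :: xs =>
      rw [rleSpec_cons]
      have hdlen := List.length_dropWhile_le (fun y => decide (y = x)) xs
      have hrec := ih (xs.dropWhile (· = x)) (by simp at h ⊢; omega)
      have hall : ∀ y ∈ xs.takeWhile (· = x), y = x := by
        intro y hy
        have := List.mem_takeWhile_imp hy
        simpa using this
      have hrep : xs.takeWhile (· = x) = List.replicate (xs.takeWhile (· = x)).length x := by
        exact List.eq_replicate_length.mpr hall
      by_cases hx : x = 0
      · subst hx
        rw [List.flatMap_cons, hrec, procA, if_pos rfl]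
        congr 1
        simp only [bSeg, Nat.cast_add, Nat.cast_one, true_and]
        norm_num
        split_ifs with hc
        · rfl
        · rw [List.replicate_succ, ← hrep]
      · rw [List.flatMap_cons, hrec]
        have hstep : procA ms (x :: xs) = (x :: xs.takeWhile (· = x)) ++ procA ms (xs.dropWhile (· = x)) := by
          conv_lhs => rw [show x :: xs = (x :: xs.takeWhile (· = x)) ++ xs.dropWhile (· = x) by simp]
          exact procA_nonzero_prefix ms _ _ (by
            intro y hy
            rcases List.mem_cons.mp hy with h1 | h1
            · simpa [h1] using hx
            · have := hall y h1; simpa [this] using hx)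
        rw [hstep]
        congr 1
        simp only [bSeg, Nat.cast_add, Nat.cast_one, hx, false_and, if_false]
        rw [List.replicate_succ, ← hrep]

theorem zscan_eq (labels : List Int) (i : Nat) :
    zscan labels i = i + ((labels.drop i).takeWhile (· = (0 : Int))).length := by
  fun_induction zscan labels i with
  | case1 i h h0 ih =>
    have hdrop : labels.drop i = labels[i] :: labels.drop (i + 1) :=
      List.drop_eq_getElem_cons h
    rw [hdrop, List.takeWhile_cons, if_pos (by simpa using h0)]
    simp [ih]
    omega
  | case2 i h h0 =>
    have hdrop : labels.drop i = labels[i] :: labels.drop (i + 1) :=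
      List.drop_eq_getElem_cons h
    rw [hdrop, List.takeWhile_cons, if_neg (by simpa using h0)]
    simp
  | case3 i h =>
    rw [List.drop_eq_nil_of_le (by omega)]
    simp

theorem aLoop_eq (ms : Int) : ∀ (labels : List Int) (i : Nat),
    aLoop labels ms i = labels.take i ++ procA ms (labels.drop i) := by
  intro labels i
  fun_induction aLoop labels ms i with
  | case1 labels i h h0 j d labels' ih =>
    have hj1 : i < j := zscan_gt labels i h h0
    have hj2 : j ≤ labels.length := zscan_le labels i (le_of_lt h)
    have hze : j = i + ((labels.drop i).takeWhile (· = (0 : Int))).length :=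
      zscan_eq labels i
    have hd : d = ((labels.drop i).takeWhile (· = (0 : Int))).length := by omega
    have htake : labels.take j = labels.take i ++ (labels.drop i).takeWhile (· = (0 : Int)) := by
      rw [hze, List.take_add]
      congr 1
      exact (List.prefix_iff_eq_take.mp (List.takeWhile_prefix _)).symm
    have hdw : labels.drop j = (labels.drop i).dropWhile (· = (0 : Int)) := by
      have hsp := List.takeWhile_append_dropWhile (p := fun y => decide (y = (0 : Int))) (l := labels.drop i)
      rw [hze, ← List.drop_drop]
      nth_rewrite 2 [← hsp]
      exact List.drop_left' rfl
    have hdropi : labels.drop i = labels[i] :: labels.drop (i + 1) :=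
      List.drop_eq_getElem_cons h
    have htcons : (labels.drop i).takeWhile (· = (0 : Int)) =
        labels[i] :: (labels.drop (i + 1)).takeWhile (· = (0 : Int)) := by
      rw [hdropi, List.takeWhile_cons, if_pos (by simpa using h0)]
    have hdwcons : (labels.drop i).dropWhile (· = (0 : Int)) =
        (labels.drop (i + 1)).dropWhile (· = (0 : Int)) := by
      rw [hdropi, List.dropWhile_cons, if_pos (by simpa using h0)]
    have hlen : d = ((labels.drop (i + 1)).takeWhile (· = (0 : Int))).length + 1 := by
      rw [hd, htcons]; simp
    have hlentake : (labels.take i).length = i := by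
      simp [List.length_take]; omega
    by_cases hms : ((d : Nat) : Int) < ms
    · have hl' : labels' = labels.take i ++ List.replicate d 1 ++ labels.drop j := by
        simp only [labels']
        split
        · rfl
        · omega
      have h1 : labels'.take j = labels.take i ++ List.replicate d 1 := by
        rw [hl']
        exact List.take_left' (by simp [hlentake]; omega)
      have h2 : labels'.drop j = labels.drop j := by
        rw [hl']
        exact List.drop_left' (by simp [hlentake]; omega)
      rw [ih, h1, h2, List.append_assoc]
      congr 1
      rw [hdropi, h0, procA, if_pos rfl, ← hdwcons, ← hdw]
      congr 1
      have hc : ((((labels.drop (i + 1)).takeWhile (· = (0 : Int))).length : Int) + 1) < ms := by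
        rw [hlen] at hms; push_cast at hms; exact hms
      rw [if_pos hc, hlen]
    · have hl' : labels' = labels := by
        simp only [labels']
        split
        · omega
        · rfl
      rw [ih, hl', htake, List.append_assoc]
      congr 1
      rw [htcons, h0, hdropi, h0, procA, if_pos rfl, ← hdwcons, ← hdw]
      congr 1
      have hc : ¬ ((((labels.drop (i + 1)).takeWhile (· = (0 : Int))).length : Int) + 1) < ms := by
        rw [hlen] at hms; push_cast at hms; exact hms
      rw [if_neg hc]
  | case2 labels i h h0 ih =>
    have hdrop : labels.drop i = labels[i] :: labels.drop (i + 1) :=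
      List.drop_eq_getElem_cons h
    rw [ih, hdrop, procA, if_neg h0]
    rw [show labels.take (i + 1) = labels.take i ++ [labels[i]] from by
      rw [List.take_succ, List.getElem?_eq_getElem h]; rfl]
    rw [List.append_assoc]
    rfl
  | case3 labels i h =>
    rw [List.drop_eq_nil_of_le (by omega), List.take_of_length_le (by omega)]
    simp [procA]

-- ===== VERDICT (by name: the statement is the Claim_ definition above) =====
theorem enforce_min_duration_spec : Claim_equal_enforce_min_duration := by
  intro labels m s _
  unfold Spec_enforce_min_duration enforce_min_duration enforce_min_duration_alt
  rw [aLoop_eq, rle_full, foldl_append_seg,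
    flatMap_rle (pyMinSamples m s) labels.length labels (le_refl _)]
  simp
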